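-- pv_equiv track=rewrite | github.com/strella111/automation | src/ui/widgets/beam_pattern_widget.py | _get_bu_numbers_by_y_section
-- ===== SOURCE A (Python) =====
-- def _get_bu_numbers_by_y_section(section: int):
--     """Возвращает номера БУ для секции по Y"""
--     bu_numbers = []
--     start_bu = (section - 1) * 8 + 1
--     end_bu = section * 8
--     for bu_num in range(start_bu, end_bu + 1):
--         if 1 <= bu_num <= 40:
--             bu_numbers.append(bu_num)
--     return bu_numbers
-- ===== SOURCE B (Python) =====
-- def _get_bu_numbers_by_y_section(section: int):
--     """Возвращает номера БУ для секции по Y"""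
--     return [n for n in range(1, 41) if (n - 1) // 8 == section - 1]
-- ===== Notes on version B (the rewrite author's own statement) =====
-- stated objective: alternative
-- what changed: Instead of generating the section's 8-number window and filtering it against [1,40], B scans the fixed universe of BU numbers 1..40 and keeps those whose section, computed as (n-1)//8 + 1, equals the argument.
import Mathlib
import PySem

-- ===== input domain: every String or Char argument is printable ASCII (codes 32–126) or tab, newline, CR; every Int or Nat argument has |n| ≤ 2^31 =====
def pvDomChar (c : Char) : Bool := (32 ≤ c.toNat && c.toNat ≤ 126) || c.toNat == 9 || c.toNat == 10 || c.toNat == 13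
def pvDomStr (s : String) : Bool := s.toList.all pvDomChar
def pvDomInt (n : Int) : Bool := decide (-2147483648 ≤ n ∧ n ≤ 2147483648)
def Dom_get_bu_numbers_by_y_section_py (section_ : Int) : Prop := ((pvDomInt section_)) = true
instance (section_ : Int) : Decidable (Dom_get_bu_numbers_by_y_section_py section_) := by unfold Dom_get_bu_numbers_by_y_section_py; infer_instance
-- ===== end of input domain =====

-- B scans the fixed BU list 1..40 and keeps the numbers whose computed section (n-1)//8 + 1
-- matches the argument, instead of generating the section's window and filtering it (objective: alternative).
-- ===== PORT A =====
def get_bu_numbers_by_y_section_py (section_ : Int) : List Int :=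
  let bu_numbers : List Int := []
  let start_bu : Int := (section_ - 1) * 8 + 1
  let end_bu : Int := section_ * 8
  (PySem.List.pyRange start_bu (end_bu + 1) 1).foldl
    (fun acc bu_num => if 1 ≤ bu_num ∧ bu_num ≤ 40 then acc ++ [bu_num] else acc) bu_numbers

-- ===== PORT B =====
def get_bu_numbers_by_y_section_py_alt (section_ : Int) : List Int :=
  (PySem.List.pyRange 1 41 1).filter
    (fun n => decide (PySem.Int.floordiv (n - 1) 8 = section_ - 1))

-- ===== PRECONDITION & SPEC =====
def Spec_get_bu_numbers_by_y_section_py (section_ : Int) (out : List Int) : Prop := out = get_bu_numbers_by_y_section_py_alt section_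
instance (section_ : Int) (out : List Int) : Decidable (Spec_get_bu_numbers_by_y_section_py section_ out) := by unfold Spec_get_bu_numbers_by_y_section_py; infer_instance

-- ===== CLAIM (what is proved, stated in full; the proofs are below) =====
def Claim_equal_get_bu_numbers_by_y_section_py : Prop := ∀ (section_ : Int), Dom_get_bu_numbers_by_y_section_py section_ → Spec_get_bu_numbers_by_y_section_py section_ (get_bu_numbers_by_y_section_py section_)

-- ===== LEMMAS AND PROOFS =====
-- Filtering an integer range by an interval [l,h] is the range with intersected bounds.
theorem filter_pyRange_interval (a b l h : Int) :
    (PySem.List.pyRange a b 1).filter (fun x => decide (l ≤ x ∧ x ≤ h)) =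
      PySem.List.pyRange (max a l) (min b (h + 1)) 1 := by
  by_cases hab : b ≤ a
  · rw [PySem.List.pyRange_one_eq_nil hab, PySem.List.pyRange_one_eq_nil (by omega)]
    rfl
  · push_neg at hab
    rw [PySem.List.pyRange_one_cons hab]
    have ih := filter_pyRange_interval (a + 1) b l h
    by_cases hp : l ≤ a ∧ a ≤ h
    · simp only [List.filter_cons, decide_eq_true_eq, if_pos hp, ih]
      obtain ⟨h1, h2⟩ := hp
      rw [show max a l = a from by omega, show max (a + 1) l = a + 1 from by omega,
        ← PySem.List.pyRange_one_cons (show a < min b (h + 1) from by omega)]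
    · simp only [List.filter_cons, decide_eq_true_eq, if_neg hp, ih]
      by_cases ha : a < l
      · congr 1; omega
      · rw [PySem.List.pyRange_one_eq_nil (by omega), PySem.List.pyRange_one_eq_nil (by omega)]
termination_by (b - a).toNat
decreasing_by omega

-- A's appending foldl is a filter.
theorem foldl_ite_filter (s : Int) :
    get_bu_numbers_by_y_section_py s =
      (PySem.List.pyRange ((s - 1) * 8 + 1) (s * 8 + 1) 1).filter
        (fun x => decide (1 ≤ x ∧ x ≤ 40)) := by
  unfold get_bu_numbers_by_y_section_py
  rw [PySem.List.foldl_append_ite_eq_filter, List.nil_append]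

-- B's section test is membership in the window [(s-1)*8+1, s*8].
theorem floordiv_test_eq_interval (s : Int) :
    get_bu_numbers_by_y_section_py_alt s =
      (PySem.List.pyRange 1 41 1).filter
        (fun x => decide ((s - 1) * 8 + 1 ≤ x ∧ x ≤ s * 8)) := by
  unfold get_bu_numbers_by_y_section_py_alt
  apply List.filter_congr
  intro x _
  simp only [decide_eq_decide, PySem.Int.floordiv_eq_iff_of_pos (b := 8) (by omega)]
  omega

-- ===== VERDICT (by name: the statement is the Claim_ definition above) =====
theorem get_bu_numbers_by_y_section_py_spec : Claim_equal_get_bu_numbers_by_y_section_py := by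
  intro s _
  unfold Spec_get_bu_numbers_by_y_section_py
  rw [foldl_ite_filter, floordiv_test_eq_interval, filter_pyRange_interval,
    filter_pyRange_interval]
  congr 1 <;> omega
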